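-- pv_equiv track=rewrite | github.com/introspective321/DE_COVID_Classification | codes/cnn_mlp_image_and_tabular.py | arrange_tabular_data
-- ===== SOURCE A (Python) =====
-- import itertools
--
-- def arrange_tabular_data(tabular_data_column_dict):
--
--     data_types = list(tabular_data_column_dict.keys())
--
--     categorical_column_name_lists = []
--     numeric_column_name_lists = []
--
--     for data_type in data_types:
--
--         categorical_column_name_lists.append(tabular_data_column_dict[data_type][0])
--         numeric_column_name_lists.append(tabular_data_column_dict[data_type][1])
--
--     data_type_combination_list=[]
--     categorical_column_name_combination_lists=[]
--     numeric_column_name_combination_lists=[]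
--
--     index_list = [i for i in range(len(data_types))]
--     for L in range(len(index_list) + 1):
--         for subset in itertools.combinations(index_list, L):
--             combination_index_list = list(subset)
--
--             if len(combination_index_list)!=0:
--                 data_type_combination=""
--                 categorical_combination=[]
--                 numeric_combination=[]
--
--                 for combination_index in combination_index_list:
--
--                     data_type_combination+=data_types[combination_index]
--                     categorical_combination+=categorical_column_name_lists[combination_index]
--                     numeric_combination+=numeric_column_name_lists[combination_index]
--
--                     if combination_index!=combination_index_list[-1]:
--                         data_type_combination+='+'
--
--                 data_type_combination_list.append(data_type_combination)
--                 categorical_column_name_combination_lists.append(categorical_combination)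
--                 numeric_column_name_combination_lists.append(numeric_combination)
--
--     tabular_column_names_data_type_combination_dict=dict()
--
--     for data_type_id in range(len(data_type_combination_list)):
--
--         categorical_and_numeric_dict = dict()
--
--         categorical_and_numeric_dict['categorical_column_names']=categorical_column_name_combination_lists[data_type_id]
--         categorical_and_numeric_dict['numeric_column_names']=numeric_column_name_combination_lists[data_type_id]
--
--         tabular_column_names_data_type_combination_dict[data_type_combination_list[data_type_id]]=categorical_and_numeric_dict
--
--     return tabular_column_names_data_type_combination_dict, data_type_combination_list
-- ===== SOURCE B (Python) =====
-- def arrange_tabular_data(tabular_data_column_dict):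
--     # Dynamic programming over subset sizes: each level extends the previous
--     # level's combinations with the items that follow their last element,
--     # which yields size-ascending, lexicographic order directly.
--     items = list(tabular_data_column_dict.items())
--     result = {}
--     names = []
--     level = [(key, value[0], value[1], items[i + 1:])
--              for i, (key, value) in enumerate(items)]
--     for _ in range(len(items)):
--         nxt = []
--         for name, cats, nums, rest in level:
--             result[name] = {'categorical_column_names': cats,
--                             'numeric_column_names': nums}
--             names.append(name)
--             for i, (key, value) in enumerate(rest):
--                 nxt.append((name + '+' + key, cats + value[0],
--                             nums + value[1], rest[i + 1:]))
--         level = nxt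
--     return result, names
-- ===== Notes on version B (the rewrite author's own statement) =====
-- stated objective: alternative
-- what changed: Replaces itertools.combinations over increasing lengths (plus a separate column-list pre-extraction pass and a final index-driven dict-building loop) by level-by-level dynamic programming over subset sizes: level 1 holds the single items, and each next level extends every combination with each item after its last element, carrying the '+'-joined name and concatenated column lists along and emitting straight into the result dict, which yields size-ascending lexicographic order directly; Pre_ excludes inputs where a value list has fewer than two column lists, on which A (and B) raise IndexError.
import Mathlib
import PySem

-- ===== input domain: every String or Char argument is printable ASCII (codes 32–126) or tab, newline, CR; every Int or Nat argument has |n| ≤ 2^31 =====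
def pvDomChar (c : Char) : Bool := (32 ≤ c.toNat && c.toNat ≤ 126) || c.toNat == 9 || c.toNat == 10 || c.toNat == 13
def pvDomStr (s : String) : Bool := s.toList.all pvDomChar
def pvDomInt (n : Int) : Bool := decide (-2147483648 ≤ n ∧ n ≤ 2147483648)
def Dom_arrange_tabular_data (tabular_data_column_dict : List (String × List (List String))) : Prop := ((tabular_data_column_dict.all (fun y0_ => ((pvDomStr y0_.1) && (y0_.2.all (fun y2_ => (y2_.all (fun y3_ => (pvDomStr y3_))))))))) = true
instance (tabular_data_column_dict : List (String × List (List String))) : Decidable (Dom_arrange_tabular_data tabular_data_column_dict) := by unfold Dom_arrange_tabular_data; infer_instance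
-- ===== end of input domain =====

-- B replaces itertools.combinations over increasing lengths by level-by-level dynamic
-- programming: each level's combinations extend the previous level's with the items
-- after their last element (objective: alternative algorithm; no speed claim).

-- ===== PORT A =====
-- itertools.combinations(xs, L) in CPython's order is PySem.List.combinations xs L.
def arrange_tabular_data (tabular_data_column_dict : List (String × List (List String))) : (List (String × List (String × List String))) × List String :=
  let d := PySem.Dict.ofList tabular_data_column_dict
  let data_types := PySem.Dict.keys d
  -- for data_type in data_types: append value[0] / value[1]  (value[j] totalized with
  -- .getD []; Pre_ excludes the inputs where Python raises IndexError here)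
  let pair := data_types.foldl
    (fun (acc : List (List String) × List (List String)) t =>
      (acc.1 ++ [(PySem.List.pyGet? (PySem.Dict.getD d t []) 0).getD []],
       acc.2 ++ [(PySem.List.pyGet? (PySem.Dict.getD d t []) 1).getD []]))
    ([], [])
  let categorical_column_name_lists := pair.1
  let numeric_column_name_lists := pair.2
  let index_list := List.range data_types.length
  let triple := (List.range (index_list.length + 1)).foldl
    (fun acc L =>
      (PySem.List.combinations index_list L).foldl
        (fun (acc : List String × List (List String) × List (List String)) subset =>
          if subset.length ≠ 0 then
            let inner := subset.foldl
              (fun (s : String × List String × List String) i =>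
                let nm := s.1 ++ data_types.getD i ""
                (if some i ≠ PySem.List.pyGet? subset (-1) then nm ++ "+" else nm,
                 s.2.1 ++ categorical_column_name_lists.getD i [],
                 s.2.2 ++ numeric_column_name_lists.getD i []))
              ("", [], [])
            (acc.1 ++ [inner.1], acc.2.1 ++ [inner.2.1], acc.2.2 ++ [inner.2.2])
          else acc)
        acc)
    ([], [], [])
  let names := triple.1
  let outDict := (List.range names.length).foldl
    (fun (od : PySem.Dict String (List (String × List String))) i =>
      od.insert (names.getD i "")
        (((PySem.Dict.empty.insert "categorical_column_names" (triple.2.1.getD i [])).insert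
            "numeric_column_names" (triple.2.2.getD i [])).items))
    PySem.Dict.empty
  (outDict.items, names)

-- ===== PORT B =====
-- B's loop body ('for name, cats, nums, rest in level: emit; extend'), factored as a
-- helper so the outer 'for _ in range(len(items))' is a fold of this single step.
def pvStepB (st : PySem.Dict String (List (String × List String)) × List String ×
    List (String × List String × List String × List (String × List (List String)))) :
    PySem.Dict String (List (String × List String)) × List String ×
    List (String × List String × List String × List (String × List (List String))) :=
  st.2.2.foldl
    (fun t e =>
      (t.1.insert e.1
        (((PySem.Dict.empty.insert "categorical_column_names" e.2.1).insert
            "numeric_column_names" e.2.2.1)).items,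
       t.2.1 ++ [e.1],
       (PySem.List.enumerate e.2.2.2).foldl
         (fun a q => a ++ [(e.1 ++ "+" ++ q.2.1,
                            e.2.1 ++ (PySem.List.pyGet? q.2.2 0).getD [],
                            e.2.2.1 ++ (PySem.List.pyGet? q.2.2 1).getD [],
                            PySem.List.slice e.2.2.2 (some (q.1 + 1)) none)])
         t.2.2))
    (st.1, st.2.1, [])

def arrange_tabular_data_alt (tabular_data_column_dict : List (String × List (List String))) : (List (String × List (String × List String))) × List String :=
  let items := (PySem.Dict.ofList tabular_data_column_dict).items
  -- level = [(key, value[0], value[1], items[i+1:]) for i, (key, value) in enumerate(items)]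
  let level := (PySem.List.enumerate items).map
    (fun p => (p.2.1, (PySem.List.pyGet? p.2.2 0).getD [], (PySem.List.pyGet? p.2.2 1).getD [],
               PySem.List.slice items (some (p.1 + 1)) none))
  let fin := (List.range items.length).foldl (fun st _ => pvStepB st)
    (PySem.Dict.empty, [], level)
  (fin.1.items, fin.2.1)

-- ===== PRECONDITION & SPEC =====
-- Pre_ excludes exactly the inputs where Python A raises IndexError: a value list with
-- fewer than two column lists (A reads value[0] and value[1]).
def Pre_arrange_tabular_data (tabular_data_column_dict : List (String × List (List String))) : Prop :=
  ∀ p ∈ tabular_data_column_dict, 2 ≤ p.2.length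
instance (tabular_data_column_dict : List (String × List (List String))) : Decidable (Pre_arrange_tabular_data tabular_data_column_dict) := by unfold Pre_arrange_tabular_data; infer_instance

def pvWitness_arrange_tabular_data : (List (String × List (List String))) :=
  [("age", [["a"], ["b", "c"]]), ("lab", [[], ["d"]])]

def Spec_arrange_tabular_data (tabular_data_column_dict : List (String × List (List String))) (out : (List (String × List (String × List String))) × List String) : Prop := out = arrange_tabular_data_alt tabular_data_column_dict
instance (tabular_data_column_dict : List (String × List (List String))) (out : (List (String × List (String × List String))) × List String) : Decidable (Spec_arrange_tabular_data tabular_data_column_dict out) := by unfold Spec_arrange_tabular_data; infer_instance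

-- ===== CLAIM (what is proved, stated in full; the proofs are below) =====
def Claim_equal_arrange_tabular_data : Prop := ∀ (tabular_data_column_dict : List (String × List (List String))), Dom_arrange_tabular_data tabular_data_column_dict → Pre_arrange_tabular_data tabular_data_column_dict → Spec_arrange_tabular_data tabular_data_column_dict (arrange_tabular_data tabular_data_column_dict)

-- ===== LEMMAS AND PROOFS =====

-- canonical per-subset emitters (index combinations) and the canonical subset stream
def pvName (items : List (String × List (List String))) (c : List Nat) : String :=
  PySem.Str.join "+" (c.map (fun i => (items.getD i ("", [])).1))
def pvCats (items : List (String × List (List String))) (c : List Nat) : List String :=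
  c.flatMap (fun i => (PySem.List.pyGet? (items.getD i ("", [])).2 0).getD [])
def pvNums (items : List (String × List (List String))) (c : List Nat) : List String :=
  c.flatMap (fun i => (PySem.List.pyGet? (items.getD i ("", [])).2 1).getD [])
def pvVal (items : List (String × List (List String))) (c : List Nat) : List (String × List String) :=
  [("categorical_column_names", pvCats items c), ("numeric_column_names", pvNums items c)]
def pvStream (n : Nat) : List (List Nat) :=
  (List.range n).flatMap (fun K => PySem.List.combinations (List.range n) (K + 1))

def pvCanon (d : List (String × List (List String))) : (List (String × List (String × List String))) × List String :=
  (((pvStream ((PySem.Dict.ofList d).items.length)).foldl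
      (fun od c => od.insert (pvName (PySem.Dict.ofList d).items c) (pvVal (PySem.Dict.ofList d).items c))
      PySem.Dict.empty).items,
   (pvStream ((PySem.Dict.ofList d).items.length)).map (pvName (PySem.Dict.ofList d).items))

-- ---- A side: collapse the three loops onto the canonical stream ----
theorem pvNameCore (A : Nat → String) (o : Option Nat) :
    ∀ (l : List Nat) (acc : String), (∀ i ∈ l.dropLast, some i ≠ o) → (l.getLast? = o) → l ≠ [] →
    l.foldl (fun s i => if some i ≠ o then s ++ A i ++ "+" else s ++ A i) acc
      = acc ++ PySem.Str.join "+" (l.map A) := by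
  intro l
  induction l with
  | nil => intro acc _ _ hne; exact absurd rfl hne
  | cons x t ih =>
    intro acc hdrop hlast _
    cases t with
    | nil =>
      simp only [List.getLast?_singleton] at hlast
      rw [List.foldl_cons]
      rw [if_neg (by rw [hlast]; simp)]
      simp only [List.foldl_nil, List.map_cons, List.map_nil]
      congr 1
      simp only [PySem.Str.join, List.map_cons, List.map_nil, PySem.Chars.join_singleton,
        String.ofList_toList]
    | cons y s =>
      have hx : some x ≠ o := by
        apply hdrop
        simp [List.dropLast_cons_of_ne_nil]
      rw [List.foldl_cons, if_pos hx]
      rw [ih (acc ++ A x ++ "+") (fun i hi => hdrop i (by simp [List.dropLast_cons_of_ne_nil, hi]))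
            (by simpa using hlast) (by simp)]
      have hjoin : PySem.Str.join "+" (List.map A (x :: y :: s))
          = A x ++ "+" ++ PySem.Str.join "+" (List.map A (y :: s)) := by
        simp only [List.map_cons, PySem.Str.join, PySem.Chars.join_cons_cons, String.ofList_append,
          String.ofList_toList]
        try congr 1
      rw [hjoin]
      simp [String.append_assoc]

theorem pvEmit (A : Nat → String) (B C : Nat → List String) (c : List Nat)
    (hp : c.Pairwise (· < ·)) (hne : c ≠ []) :
    c.foldl (fun (s : String × List String × List String) i =>
        (if some i ≠ PySem.List.pyGet? c (-1) then s.1 ++ A i ++ "+" else s.1 ++ A i,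
         s.2.1 ++ B i, s.2.2 ++ C i)) ("", [], [])
      = (PySem.Str.join "+" (c.map A), c.flatMap B, c.flatMap C) := by
  rw [PySem.List.foldl_prod_mk
        (f := fun s1 i => if some i ≠ PySem.List.pyGet? c (-1) then s1 ++ A i ++ "+" else s1 ++ A i)
        (g := fun (s2 : List String × List String) i => (s2.1 ++ B i, s2.2 ++ C i))]
  rw [PySem.List.foldl_prod_mk (f := fun s i => s ++ B i) (g := fun s i => s ++ C i)]
  rw [PySem.List.foldl_append_eq_flatMap, PySem.List.foldl_append_eq_flatMap]
  rw [PySem.List.pyGet?_neg_one]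
  have hlast : c.getLast? = some (c.getLast hne) := List.getLast?_eq_some_getLast hne
  rw [pvNameCore A c.getLast? c "" ?hdrop rfl hne]
  · simp
  case hdrop =>
    intro i hi
    have hdecomp : c.dropLast ++ [c.getLast hne] = c := List.dropLast_append_getLast hne
    have hlt : i < c.getLast hne := by
      have hp' : (c.dropLast ++ [c.getLast hne]).Pairwise (· < ·) := by rw [hdecomp]; exact hp
      rw [List.pairwise_append] at hp'
      exact hp'.2.2 i hi _ (by simp)
    rw [hlast]
    intro hcon
    injection hcon with h
    omega

theorem pvStream_mem (n : Nat) (c : List Nat) (hc : c ∈ pvStream n) :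
    c.Pairwise (· < ·) ∧ c ≠ [] ∧ ∀ i ∈ c, i < n := by
  unfold pvStream at hc
  rw [List.mem_flatMap] at hc
  obtain ⟨K, _, hcK⟩ := hc
  have hsub := PySem.List.sublist_of_mem_combinations hcK
  have hlen := PySem.List.length_of_mem_combinations hcK
  refine ⟨List.Pairwise.sublist hsub List.pairwise_lt_range, ?_, ?_⟩
  · intro h; rw [h] at hlen; simp at hlen
  · intro i hi
    have := hsub.mem hi
    simpa using this

theorem pvLoopTriple {μ : Type} (l : List μ) (p : μ → Prop) [DecidablePred p]
    (f1 : μ → String) (f2 f3 : μ → List String)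
    (st : List String × List (List String) × List (List String)) :
    l.foldl (fun acc c => if p c then (acc.1 ++ [f1 c], acc.2.1 ++ [f2 c], acc.2.2 ++ [f3 c]) else acc) st
      = (st.1 ++ (l.filter (fun c => decide (p c))).map f1,
         st.2.1 ++ (l.filter (fun c => decide (p c))).map f2,
         st.2.2 ++ (l.filter (fun c => decide (p c))).map f3) := by
  induction l generalizing st with
  | nil => simp
  | cons x t ih => by_cases hx : p x <;> simp [hx, ih]

theorem pvLoopTripleOuter {μ ν : Type} (Ls : List ν) (g : ν → List μ) (p : μ → Prop) [DecidablePred p]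
    (f1 : μ → String) (f2 f3 : μ → List String)
    (st : List String × List (List String) × List (List String)) :
    Ls.foldl (fun acc L => (g L).foldl
        (fun acc c => if p c then (acc.1 ++ [f1 c], acc.2.1 ++ [f2 c], acc.2.2 ++ [f3 c]) else acc) acc) st
      = (st.1 ++ (Ls.flatMap (fun L => (((g L).filter (fun c => decide (p c)))).map f1)),
         st.2.1 ++ (Ls.flatMap (fun L => (((g L).filter (fun c => decide (p c)))).map f2)),
         st.2.2 ++ (Ls.flatMap (fun L => (((g L).filter (fun c => decide (p c)))).map f3))) := by
  induction Ls generalizing st with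
  | nil => simp
  | cons L Ls ih =>
    rw [List.foldl_cons, pvLoopTriple, ih]
    simp [List.append_assoc]

theorem pvStream_eq (n : Nat) {β : Type} (f : List Nat → β) :
    (List.range (n + 1)).flatMap
        (fun L => ((PySem.List.combinations (List.range n) L).filter (fun c => decide (c.length ≠ 0))).map f)
      = (pvStream n).map f := by
  rw [List.range_succ_eq_map, List.flatMap_cons, List.flatMap_map]
  have h0 : ((PySem.List.combinations (List.range n) 0).filter (fun c => decide (c.length ≠ 0))).map f = [] := by
    rw [PySem.List.combinations_zero]
    rfl
  rw [h0, List.nil_append]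
  unfold pvStream
  rw [List.map_flatMap]
  congr 1
  funext K
  have hfil : (PySem.List.combinations (List.range n) (K + 1)).filter (fun c => decide (c.length ≠ 0))
      = PySem.List.combinations (List.range n) (K + 1) := by
    apply List.filter_eq_self.mpr
    intro c hc
    have := PySem.List.length_of_mem_combinations hc
    simp [this]
  rw [show (K : Nat).succ = K + 1 from rfl, hfil]

theorem pvFoldlIdx {γ δ : Type} (S : List γ) (e1 : γ → String) (e2 e3 : γ → List String)
    (G : δ → String → List String → List String → δ) (st : δ) :
    (List.range (S.map e1).length).foldl
        (fun od i => G od ((S.map e1).getD i "") ((S.map e2).getD i []) ((S.map e3).getD i [])) st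
      = S.foldl (fun od c => G od (e1 c) (e2 c) (e3 c)) st := by
  induction S using List.reverseRecOn generalizing st with
  | nil => simp
  | append_singleton S y ih =>
    rw [List.length_map, List.length_append, List.length_singleton, List.range_succ,
        List.foldl_append, List.foldl_append]
    have hcon : ∀ (acc : δ), ∀ i ∈ List.range S.length,
        G acc (((S ++ [y]).map e1).getD i "") (((S ++ [y]).map e2).getD i []) (((S ++ [y]).map e3).getD i [])
          = G acc ((S.map e1).getD i "") ((S.map e2).getD i []) ((S.map e3).getD i []) := by
      intro acc i hi
      rw [List.mem_range] at hi
      rw [List.map_append, List.map_append, List.map_append,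
          List.getD_append _ _ _ _ (by simpa using hi),
          List.getD_append _ _ _ _ (by simpa using hi),
          List.getD_append _ _ _ _ (by simpa using hi)]
    rw [PySem.List.foldl_congr_mem _ _ _ _ hcon]
    rw [show (List.range S.length) = List.range (S.map e1).length by simp]
    rw [ih]
    have hlast : ∀ {β : Type} (f : γ → β) (dflt : β), ((S ++ [y]).map f).getD S.length dflt = f y := by
      intro β f dflt
      have h : (S ++ [y]).map f = S.map f ++ [f y] := by simp
      rw [h, List.getD_eq_getElem?_getD, ← List.length_map (f := f) (as := S),
          List.getElem?_concat_length]
      rfl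
    simp only [List.foldl_cons, List.foldl_nil]
    rw [hlast e1 "", hlast e2 [], hlast e3 []]

theorem a_eq_canon (d : List (String × List (List String))) :
    arrange_tabular_data d = pvCanon d := by
  unfold pvCanon
  have hnodup := PySem.Dict.nodup_keys_ofList d
  have hitems := PySem.Dict.items_eq_map_keys (PySem.Dict.ofList d) hnodup []
  simp only [arrange_tabular_data]
  rw [PySem.List.foldl_prod_mk
        (f := fun (acc : List (List String)) t => acc ++ [(PySem.List.pyGet? (PySem.Dict.getD (PySem.Dict.ofList d) t []) 0).getD []])
        (g := fun (acc : List (List String)) t => acc ++ [(PySem.List.pyGet? (PySem.Dict.getD (PySem.Dict.ofList d) t []) 1).getD []])]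
  rw [PySem.List.foldl_append_singleton_eq_map, PySem.List.foldl_append_singleton_eq_map]
  rw [pvLoopTripleOuter
        (g := fun L => PySem.List.combinations (List.range ((PySem.Dict.ofList d).keys.length)) L)
        (p := fun (subset : List Nat) => subset.length ≠ 0)
        (f1 := fun subset => (subset.foldl
            (fun (s : String × List String × List String) i =>
              (if some i ≠ PySem.List.pyGet? subset (-1)
               then s.1 ++ (PySem.Dict.ofList d).keys.getD i "" ++ "+"
               else s.1 ++ (PySem.Dict.ofList d).keys.getD i "",
               s.2.1 ++ (([] : List (List String)) ++ (PySem.Dict.ofList d).keys.map (fun t => (PySem.List.pyGet? (PySem.Dict.getD (PySem.Dict.ofList d) t []) 0).getD [])).getD i [],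
               s.2.2 ++ (([] : List (List String)) ++ (PySem.Dict.ofList d).keys.map (fun t => (PySem.List.pyGet? (PySem.Dict.getD (PySem.Dict.ofList d) t []) 1).getD [])).getD i []))
            ("", [], [])).1)]
  simp only [List.nil_append, List.length_range]
  rw [pvStream_eq, pvStream_eq, pvStream_eq]
  rw [pvFoldlIdx (S := pvStream (PySem.Dict.ofList d).keys.length)
        (e1 := (fun subset => (List.foldl
          (fun (s : String × List String × List String) i =>
            (if some i ≠ PySem.List.pyGet? subset (-1) then
                s.1 ++ (PySem.Dict.ofList d).keys.getD i "" ++ "+"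
              else s.1 ++ (PySem.Dict.ofList d).keys.getD i "",
              s.2.1 ++ (List.map (fun t => (PySem.List.pyGet? ((PySem.Dict.ofList d).getD t []) 0).getD []) (PySem.Dict.ofList d).keys).getD i [],
              s.2.2 ++ (List.map (fun t => (PySem.List.pyGet? ((PySem.Dict.ofList d).getD t []) 1).getD []) (PySem.Dict.ofList d).keys).getD i []))
          ("", [], []) subset).1))
        (e2 := (fun subset => (List.foldl
          (fun (s : String × List String × List String) i =>
            (if some i ≠ PySem.List.pyGet? subset (-1) then
                s.1 ++ (PySem.Dict.ofList d).keys.getD i "" ++ "+"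
              else s.1 ++ (PySem.Dict.ofList d).keys.getD i "",
              s.2.1 ++ (List.map (fun t => (PySem.List.pyGet? ((PySem.Dict.ofList d).getD t []) 0).getD []) (PySem.Dict.ofList d).keys).getD i [],
              s.2.2 ++ (List.map (fun t => (PySem.List.pyGet? ((PySem.Dict.ofList d).getD t []) 1).getD []) (PySem.Dict.ofList d).keys).getD i []))
          ("", [], []) subset).2.1))
        (e3 := (fun subset => (List.foldl
          (fun (s : String × List String × List String) i =>
            (if some i ≠ PySem.List.pyGet? subset (-1) then
                s.1 ++ (PySem.Dict.ofList d).keys.getD i "" ++ "+"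
              else s.1 ++ (PySem.Dict.ofList d).keys.getD i "",
              s.2.1 ++ (List.map (fun t => (PySem.List.pyGet? ((PySem.Dict.ofList d).getD t []) 0).getD []) (PySem.Dict.ofList d).keys).getD i [],
              s.2.2 ++ (List.map (fun t => (PySem.List.pyGet? ((PySem.Dict.ofList d).getD t []) 1).getD []) (PySem.Dict.ofList d).keys).getD i []))
          ("", [], []) subset).2.2))
        (G := fun od n1 c1 c2 => od.insert n1
          (((PySem.Dict.empty.insert "categorical_column_names" c1).insert "numeric_column_names" c2)).items)
        (st := PySem.Dict.empty)]
  have hlen : (PySem.Dict.ofList d).items.length = (PySem.Dict.ofList d).keys.length := by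
    rw [hitems]; simp
  rw [hlen]
  have hKI : ∀ i, i < (PySem.Dict.ofList d).keys.length →
      (PySem.Dict.ofList d).items.getD i ("", [])
        = ((PySem.Dict.ofList d).keys.getD i "",
           (PySem.Dict.ofList d).getD ((PySem.Dict.ofList d).keys.getD i "") []) := by
    intro i hi
    rw [hitems, List.getD_eq_getElem?_getD, List.getElem?_map, List.getElem?_eq_getElem hi]
    simp [List.getD_eq_getElem?_getD, List.getElem?_eq_getElem hi]
  have hE : ∀ c ∈ pvStream (PySem.Dict.ofList d).keys.length,
      (List.foldl
          (fun (s : String × List String × List String) i =>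
            (if some i ≠ PySem.List.pyGet? c (-1) then
                s.1 ++ (PySem.Dict.ofList d).keys.getD i "" ++ "+"
              else s.1 ++ (PySem.Dict.ofList d).keys.getD i "",
              s.2.1 ++ (List.map (fun t => (PySem.List.pyGet? ((PySem.Dict.ofList d).getD t []) 0).getD []) (PySem.Dict.ofList d).keys).getD i [],
              s.2.2 ++ (List.map (fun t => (PySem.List.pyGet? ((PySem.Dict.ofList d).getD t []) 1).getD []) (PySem.Dict.ofList d).keys).getD i []))
          ("", [], []) c)
        = (pvName (PySem.Dict.ofList d).items c,
           pvCats (PySem.Dict.ofList d).items c,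
           pvNums (PySem.Dict.ofList d).items c) := by
    intro c hc
    obtain ⟨hp, hne, hbnd⟩ := pvStream_mem _ c hc
    rw [pvEmit _ _ _ c hp hne]
    refine Prod.ext ?_ (Prod.ext ?_ ?_)
    · show PySem.Str.join "+" _ = pvName _ c
      unfold pvName
      congr 1
      apply List.map_congr_left
      intro i hi
      rw [hKI i (hbnd i hi)]
    · show List.flatMap _ c = pvCats _ c
      unfold pvCats
      apply List.flatMap_congr
      intro i hi
      have hilt := hbnd i hi
      rw [hKI i hilt, List.getD_eq_getElem?_getD, List.getElem?_map, List.getElem?_eq_getElem hilt]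
      simp [List.getD_eq_getElem?_getD, List.getElem?_eq_getElem hilt]
    · show List.flatMap _ c = pvNums _ c
      unfold pvNums
      apply List.flatMap_congr
      intro i hi
      have hilt := hbnd i hi
      rw [hKI i hilt, List.getD_eq_getElem?_getD, List.getElem?_map, List.getElem?_eq_getElem hilt]
      simp [List.getD_eq_getElem?_getD, List.getElem?_eq_getElem hilt]
  refine Prod.ext ?_ ?_
  · show (List.foldl _ PySem.Dict.empty _).items = _
    congr 1
    apply PySem.List.foldl_congr_mem
    intro acc c hc
    have h := hE c hc
    rw [h]
    rfl
  · show List.map _ _ = List.map _ _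
    apply List.map_congr_left
    intro c hc
    exact congrArg Prod.fst (hE c hc)

-- ---- B side: combinations-with-rest and the level dynamics ----
def pvPicks {α : Type} : List α → List (α × List α)
  | [] => []
  | x :: xs => (x, xs) :: pvPicks xs

def pvCwr {α : Type} : List α → Nat → List (List α × List α)
  | l, 0 => [([], l)]
  | [], _ + 1 => []
  | x :: xs, k + 1 => ((pvCwr xs k).map (fun p => (x :: p.1, p.2))) ++ pvCwr xs (k + 1)

def pvExtC {α : Type} (p : List α × List α) : List (List α × List α) :=
  (pvPicks p.2).map (fun q => (p.1 ++ [q.1], q.2))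

theorem pvCwr_zero {α : Type} (l : List α) : pvCwr l 0 = [([], l)] := by
  cases l <;> rfl

theorem pvCwr_fst {α : Type} (l : List α) : ∀ k, (pvCwr l k).map Prod.fst = PySem.List.combinations l k := by
  induction l with
  | nil =>
    intro k
    cases k <;> simp [pvCwr, PySem.List.combinations_zero, PySem.List.combinations_nil_succ]
  | cons x xs ih =>
    intro k
    cases k with
    | zero => simp [pvCwr, PySem.List.combinations_zero]
    | succ k =>
      simp only [pvCwr, List.map_append, List.map_map, PySem.List.combinations_cons_succ, ← ih]
      rfl

theorem pvCwr_step {α : Type} (l : List α) : ∀ k,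
    (pvCwr l k).flatMap pvExtC = pvCwr l (k + 1) := by
  induction l with
  | nil =>
    intro k
    cases k <;> simp [pvCwr, pvExtC, pvPicks]
  | cons x xs ih =>
    intro k
    cases k with
    | zero =>
      simp only [pvCwr, List.flatMap_cons, List.flatMap_nil, List.append_nil, pvExtC, pvPicks,
        List.map_cons, List.nil_append]
      rw [← ih 0]
      simp [pvCwr, pvExtC]
    | succ k =>
      show (((pvCwr xs k).map (fun p => (x :: p.1, p.2))) ++ pvCwr xs (k + 1)).flatMap pvExtC
          = ((pvCwr xs (k + 1)).map (fun p => (x :: p.1, p.2))) ++ pvCwr xs (k + 2)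
      rw [List.flatMap_append, ih (k + 1)]
      congr 1
      rw [List.flatMap_map, ← ih k, List.map_flatMap]
      congr 1
      funext p
      simp [pvExtC, List.map_map, Function.comp_def]

theorem pvCwr_fst_ne {α : Type} (l : List α) (k : Nat) (p : List α × List α)
    (hp : p ∈ pvCwr l (k + 1)) : p.1 ≠ [] := by
  have h1 : p.1 ∈ PySem.List.combinations l (k + 1) := by
    rw [← pvCwr_fst]
    exact List.mem_map_of_mem hp
  have h2 := PySem.List.length_of_mem_combinations h1
  intro hnil
  rw [hnil] at h2
  simp at h2

-- join "+" over a snoc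
theorem pvJoin_singleton (x : String) : PySem.Str.join "+" [x] = x := by
  simp only [PySem.Str.join, List.map_cons, List.map_nil, PySem.Chars.join_singleton,
    String.ofList_toList]

theorem pvJoin_cons_cons (x y : String) (s : List String) :
    PySem.Str.join "+" (x :: y :: s) = x ++ "+" ++ PySem.Str.join "+" (y :: s) := by
  simp only [PySem.Str.join, List.map_cons, PySem.Chars.join_cons_cons, String.ofList_append,
    String.ofList_toList]
  try congr 1

theorem pvJoin_append (xs : List String) (y : String) (h : xs ≠ []) :
    PySem.Str.join "+" (xs ++ [y]) = PySem.Str.join "+" xs ++ "+" ++ y := by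
  induction xs with
  | nil => exact absurd rfl h
  | cons x t ih =>
    cases t with
    | nil =>
      rw [List.cons_append, List.nil_append, pvJoin_cons_cons, pvJoin_singleton, pvJoin_singleton]
    | cons z t' =>
      rw [List.cons_append, List.cons_append, pvJoin_cons_cons, ← List.cons_append,
        ih (by simp), pvJoin_cons_cons]
      simp [String.append_assoc]

-- the B-side emitters over item combinations
def pvNm (c : List (String × List (List String))) : String :=
  PySem.Str.join "+" (c.map Prod.fst)
def pvCt (c : List (String × List (List String))) : List String :=
  c.flatMap (fun kv => (PySem.List.pyGet? kv.2 0).getD [])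
def pvNu (c : List (String × List (List String))) : List String :=
  c.flatMap (fun kv => (PySem.List.pyGet? kv.2 1).getD [])
def pvEmitB (p : List (String × List (List String)) × List (String × List (List String))) :
    String × List String × List String × List (String × List (List String)) :=
  (pvNm p.1, pvCt p.1, pvNu p.1, p.2)
def pvDV (cats nums : List String) : List (String × List String) :=
  ((PySem.Dict.empty.insert "categorical_column_names" cats).insert
      "numeric_column_names" nums).items

-- enumerate + suffix slices = pvPicks
theorem pvMapEnum {α β : Type} (f : α → List α → β) : ∀ (l pre : List α),
    (PySem.List.enumerate l (pre.length : Int)).map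
        (fun q => f q.2 (PySem.List.slice (pre ++ l) (some (q.1 + 1)) none))
      = (pvPicks l).map (fun q => f q.1 q.2) := by
  intro l
  induction l with
  | nil => intro pre; simp [PySem.List.enumerate_nil, pvPicks]
  | cons x xs ih =>
    intro pre
    rw [PySem.List.enumerate_cons, List.map_cons]
    show _ :: _ = (pvPicks (x :: xs)).map (fun q => f q.1 q.2)
    rw [pvPicks, List.map_cons]
    congr 1
    · have hs : PySem.List.slice (pre ++ x :: xs) (some ((pre.length : Int) + 1)) none = xs := by
        have hc : ((pre.length : Int) + 1) = ((pre.length + 1 : Nat) : Int) := by push_cast; ring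
        rw [hc, PySem.List.slice_from_natCast,
          show pre ++ x :: xs = (pre ++ [x]) ++ xs by simp,
          show pre.length + 1 = (pre ++ [x]).length by simp, List.drop_left]
      rw [hs]
    · have hpre : (pre.length : Int) + 1 = ((pre ++ [x]).length : Int) := by simp
      rw [hpre, show pre ++ x :: xs = (pre ++ [x]) ++ xs by simp, ih (pre ++ [x])]

theorem pvMapEnum0 {α β : Type} (f : α → List α → β) (l : List α) :
    (PySem.List.enumerate l).map
        (fun q => f q.2 (PySem.List.slice l (some (q.1 + 1)) none))
      = (pvPicks l).map (fun q => f q.1 q.2) := by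
  have h := pvMapEnum f l []
  simpa using h

-- one pvStepB step on a level of emitted entries
theorem pvStepCore (L : List (List (String × List (List String)) × List (String × List (List String))))
    (h : ∀ p ∈ L, p.1 ≠ []) :
    ∀ (D : PySem.Dict String (List (String × List String))) (N : List String)
      (acc : List (String × List String × List String × List (String × List (List String)))),
    (L.map pvEmitB).foldl
        (fun t e =>
          (t.1.insert e.1
            (((PySem.Dict.empty.insert "categorical_column_names" e.2.1).insert
                "numeric_column_names" e.2.2.1)).items,
           t.2.1 ++ [e.1],
           (PySem.List.enumerate e.2.2.2).foldl
             (fun a q => a ++ [(e.1 ++ "+" ++ q.2.1,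
                                e.2.1 ++ (PySem.List.pyGet? q.2.2 0).getD [],
                                e.2.2.1 ++ (PySem.List.pyGet? q.2.2 1).getD [],
                                PySem.List.slice e.2.2.2 (some (q.1 + 1)) none)])
             t.2.2))
        (D, N, acc)
      = (L.foldl (fun dc p => dc.insert (pvNm p.1) (pvDV (pvCt p.1) (pvNu p.1))) D,
         N ++ L.map (fun p => pvNm p.1),
         acc ++ (L.flatMap pvExtC).map pvEmitB) := by
  induction L with
  | nil => intro D N acc; simp
  | cons p L ih =>
    intro D N acc
    rw [List.map_cons, List.foldl_cons]
    have hinner : (PySem.List.enumerate (pvEmitB p).2.2.2).foldl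
        (fun a q => a ++ [((pvEmitB p).1 ++ "+" ++ q.2.1,
                           (pvEmitB p).2.1 ++ (PySem.List.pyGet? q.2.2 0).getD [],
                           (pvEmitB p).2.2.1 ++ (PySem.List.pyGet? q.2.2 1).getD [],
                           PySem.List.slice (pvEmitB p).2.2.2 (some (q.1 + 1)) none)])
        acc
        = acc ++ (pvExtC p).map pvEmitB := by
      rw [PySem.List.foldl_append_singleton_eq_map]
      congr 1
      show (PySem.List.enumerate p.2).map
          (fun q => (pvNm p.1 ++ "+" ++ q.2.1,
                     pvCt p.1 ++ (PySem.List.pyGet? q.2.2 0).getD [],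
                     pvNu p.1 ++ (PySem.List.pyGet? q.2.2 1).getD [],
                     PySem.List.slice p.2 (some (q.1 + 1)) none)) = _
      rw [pvMapEnum0 (f := fun kv rest =>
        (pvNm p.1 ++ "+" ++ kv.1,
         pvCt p.1 ++ (PySem.List.pyGet? kv.2 0).getD [],
         pvNu p.1 ++ (PySem.List.pyGet? kv.2 1).getD [],
         rest)) p.2]
      unfold pvExtC
      rw [List.map_map]
      apply List.map_congr_left
      intro q _
      simp only [Function.comp_def, pvEmitB]
      have hnm : pvNm (p.1 ++ [q.1]) = pvNm p.1 ++ "+" ++ q.1.1 := by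
        unfold pvNm
        rw [List.map_append, List.map_cons, List.map_nil,
          pvJoin_append _ _ (by simpa using h p (by simp))]
      have hct : pvCt (p.1 ++ [q.1]) = pvCt p.1 ++ (PySem.List.pyGet? q.1.2 0).getD [] := by
        simp [pvCt]
      have hnu : pvNu (p.1 ++ [q.1]) = pvNu p.1 ++ (PySem.List.pyGet? q.1.2 1).getD [] := by
        simp [pvNu]
      rw [hnm, hct, hnu]
    show List.foldl _ ((D.insert (pvEmitB p).1 _, N ++ [(pvEmitB p).1], _)) _ = _
    rw [hinner]
    rw [ih (fun r hr => h r (by simp [hr])) _ _ _]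
    simp only [pvEmitB, pvDV]
    refine Prod.ext rfl (Prod.ext ?_ ?_)
    · simp
    · simp [List.flatMap_cons]

theorem pvFoldl_const {σ α : Type} (l : List α) (g : σ → σ) (init : σ) :
    l.foldl (fun s _ => g s) init = g^[l.length] init := by
  induction l generalizing init with
  | nil => rfl
  | cons x t ih => rw [List.foldl_cons, ih, List.length_cons, Function.iterate_succ_apply]

theorem pvIter (items : List (String × List (List String))) : ∀ (j k : Nat)
    (D : PySem.Dict String (List (String × List String))) (N : List String),
    pvStepB^[j] (D, N, (pvCwr items (k + 1)).map pvEmitB)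
      = (((List.range j).flatMap (fun i => pvCwr items (k + 1 + i))).foldl
            (fun dc p => dc.insert (pvNm p.1) (pvDV (pvCt p.1) (pvNu p.1))) D,
         N ++ ((List.range j).flatMap (fun i => pvCwr items (k + 1 + i))).map (fun p => pvNm p.1),
         (pvCwr items (k + 1 + j)).map pvEmitB) := by
  intro j
  induction j with
  | zero => intro k D N; simp
  | succ j ih =>
    intro k D N
    rw [Function.iterate_succ_apply]
    have hstep : pvStepB (D, N, (pvCwr items (k + 1)).map pvEmitB)
        = ((pvCwr items (k + 1)).foldl
              (fun dc p => dc.insert (pvNm p.1) (pvDV (pvCt p.1) (pvNu p.1))) D,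
           N ++ (pvCwr items (k + 1)).map (fun p => pvNm p.1),
           (pvCwr items (k + 2)).map pvEmitB) := by
      unfold pvStepB
      rw [pvStepCore (pvCwr items (k + 1)) (fun p hp => pvCwr_fst_ne items k p hp) D N []]
      rw [List.nil_append, pvCwr_step items (k + 1)]
    rw [hstep, ih (k + 1)]
    have hr : List.range (j + 1) = 0 :: (List.range j).map (· + 1) := by
      rw [List.range_succ_eq_map]
    have hflat : (List.range (j + 1)).flatMap (fun i => pvCwr items (k + 1 + i))
        = pvCwr items (k + 1) ++ (List.range j).flatMap (fun i => pvCwr items (k + 1 + 1 + i)) := by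
      have harith : ∀ i : Nat, k + 1 + (i + 1) = k + 1 + 1 + i := fun i => by omega
      rw [hr, List.flatMap_cons, List.flatMap_map]
      congr 1
      apply List.flatMap_congr
      intro i _
      rw [harith i]
    rw [hflat]
    refine Prod.ext ?_ (Prod.ext ?_ ?_)
    · simp [List.foldl_append]
    · simp [List.append_assoc]
    · simp only [show k + 1 + (j + 1) = k + 1 + 1 + j from by omega]

theorem pvItemsEq (l : List (String × List (List String))) :
    (List.range l.length).map (fun i => l.getD i ("", [])) = l := by
  apply List.ext_getElem
  · simp
  · intro i h1 h2
    simp [List.getD_eq_getElem?_getD, List.getElem?_eq_getElem h2]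

theorem pvS_fst (items : List (String × List (List String))) :
    ((List.range items.length).flatMap (fun i => pvCwr items (0 + 1 + i))).map Prod.fst
      = (pvStream items.length).map (List.map (fun i => items.getD i ("", []))) := by
  rw [List.map_flatMap]
  unfold pvStream
  rw [List.map_flatMap]
  congr 1
  funext K
  show (pvCwr items (0 + 1 + K)).map Prod.fst = _
  rw [pvCwr_fst]
  calc PySem.List.combinations items (0 + 1 + K)
      = PySem.List.combinations ((List.range items.length).map (fun i => items.getD i ("", []))) (K + 1) := by
        rw [pvItemsEq]
        congr 1
        omega
    _ = (PySem.List.combinations (List.range items.length) (K + 1)).map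
          (List.map (fun i => items.getD i ("", []))) := by
        rw [PySem.List.combinations_map]

theorem pvNm_get (items : List (String × List (List String))) (c : List Nat) :
    pvNm (c.map (fun i => items.getD i ("", []))) = pvName items c := by
  simp [pvNm, pvName, List.map_map, Function.comp_def]

theorem pvVal_get (items : List (String × List (List String))) (c : List Nat) :
    pvDV (pvCt (c.map (fun i => items.getD i ("", []))))
         (pvNu (c.map (fun i => items.getD i ("", []))))
      = pvVal items c := by
  simp [pvDV, pvCt, pvNu, pvVal, pvCats, pvNums, List.flatMap_map,
    PySem.Dict.insert, PySem.Dict.empty]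

theorem alt_eq_canon (d : List (String × List (List String))) :
    arrange_tabular_data_alt d = pvCanon d := by
  simp only [arrange_tabular_data_alt, pvCanon]
  generalize (PySem.Dict.ofList d).items = items
  rw [pvFoldl_const, List.length_range]
  have hlevel : (PySem.List.enumerate items).map
      (fun p => (p.2.1, (PySem.List.pyGet? p.2.2 0).getD [], (PySem.List.pyGet? p.2.2 1).getD [],
                 PySem.List.slice items (some (p.1 + 1)) none))
      = (pvCwr items (0 + 1)).map pvEmitB := by
    rw [pvMapEnum0 (f := fun kv rest =>
      (kv.1, (PySem.List.pyGet? kv.2 0).getD [], (PySem.List.pyGet? kv.2 1).getD [], rest)) items]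
    rw [← pvCwr_step items 0,
      pvCwr_zero items,
      List.flatMap_cons, List.flatMap_nil, List.append_nil]
    unfold pvExtC
    rw [List.map_map]
    apply List.map_congr_left
    intro q _
    simp only [Function.comp_def, pvEmitB, List.nil_append]
    have h1 : pvNm [q.1] = q.1.1 := by simp [pvNm, pvJoin_singleton]
    have h2 : pvCt [q.1] = (PySem.List.pyGet? q.1.2 0).getD [] := by simp [pvCt]
    have h3 : pvNu [q.1] = (PySem.List.pyGet? q.1.2 1).getD [] := by simp [pvNu]
    rw [h1, h2, h3]
  rw [hlevel, pvIter items items.length 0 PySem.Dict.empty []]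
  simp only [List.nil_append]
  have hS := pvS_fst items
  refine Prod.ext ?_ ?_
  · show (List.foldl _ PySem.Dict.empty _).items = (List.foldl _ PySem.Dict.empty _).items
    have hdict :
        List.foldl (fun dc (p : List (String × List (List String)) × List (String × List (List String))) =>
            dc.insert (pvNm p.1) (pvDV (pvCt p.1) (pvNu p.1))) PySem.Dict.empty
          ((List.range items.length).flatMap (fun i => pvCwr items (0 + 1 + i)))
          = List.foldl (fun od c => od.insert (pvName items c) (pvVal items c)) PySem.Dict.empty
              (pvStream items.length) := by
      calc List.foldl (fun dc (p : List (String × List (List String)) × List (String × List (List String))) =>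
              dc.insert (pvNm p.1) (pvDV (pvCt p.1) (pvNu p.1))) PySem.Dict.empty
            ((List.range items.length).flatMap (fun i => pvCwr items (0 + 1 + i)))
          = List.foldl (fun dc c => dc.insert (pvNm c) (pvDV (pvCt c) (pvNu c))) PySem.Dict.empty
              (((List.range items.length).flatMap (fun i => pvCwr items (0 + 1 + i))).map Prod.fst) := by
            rw [List.foldl_map]
        _ = List.foldl (fun dc c => dc.insert (pvNm c) (pvDV (pvCt c) (pvNu c))) PySem.Dict.empty
              ((pvStream items.length).map (List.map (fun i => items.getD i ("", [])))) := by
            rw [hS]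
        _ = List.foldl (fun od c => od.insert (pvName items c) (pvVal items c)) PySem.Dict.empty
              (pvStream items.length) := by
            rw [List.foldl_map]
            apply PySem.List.foldl_congr_mem
            intro acc c _
            rw [pvNm_get, pvVal_get]
    exact congrArg PySem.Dict.items hdict
  · show List.map _ _ = List.map _ _
    have hmm : List.map (fun (p : List (String × List (List String)) × List (String × List (List String))) =>
          pvNm p.1)
        ((List.range items.length).flatMap (fun i => pvCwr items (0 + 1 + i)))
        = List.map pvNm (((List.range items.length).flatMap (fun i => pvCwr items (0 + 1 + i))).map Prod.fst) := by
      rw [List.map_map]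
      rfl
    rw [hmm, hS, List.map_map]
    apply List.map_congr_left
    intro c _
    exact pvNm_get items c

-- ===== VERDICT (by name: the statement is the Claim_ definition above) =====
theorem arrange_tabular_data_spec : Claim_equal_arrange_tabular_data := by
  intro d _ _
  unfold Spec_arrange_tabular_data
  rw [a_eq_canon d, alt_eq_canon d]
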